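-- pv_equiv track=rewrite | github.com/DarkCode-AI/portfolio | core/coder.py | _find_context_match
-- ===== SOURCE A (Python) =====
-- def _find_context_match(
--     lines: list[str], pattern: list[str], hint_offset: int
-- ) -> int | None:
--     """Find where a pattern of lines appears in the file.
--
--     Uses hint_offset (from @@ header) as starting point, then searches
--     outward in expanding window if exact position doesn't match.
--     """
--     if not pattern:
--         return None
--
--     def _lines_match(a: str, b: str) -> bool:
--         """Compare lines ignoring trailing whitespace."""
--         return a.rstrip() == b.rstrip()
--
--     def _check_at(offset: int) -> bool:
--         """Check if pattern matches at this offset."""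
--         if offset < 0 or offset + len(pattern) > len(lines):
--             return False
--         return all(_lines_match(lines[offset + i], pattern[i]) for i in range(len(pattern)))
--
--     # Try hint position first
--     if _check_at(hint_offset):
--         return hint_offset
--
--     # Search outward from hint (up to 50 lines in each direction)
--     for delta in range(1, 50):
--         if _check_at(hint_offset - delta):
--             return hint_offset - delta
--         if _check_at(hint_offset + delta):
--             return hint_offset + delta
--
--     # Last resort: search entire file
--     for i in range(len(lines)):
--         if _check_at(i):
--             return i
--
--     return None
-- ===== SOURCE B (Python) =====
-- def _find_context_match(
--     lines: list[str], pattern: list[str], hint_offset: int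
-- ) -> int | None:
--     """Find where a pattern of lines appears in the file.
--
--     Normalizes all lines once (rstrip), collects every offset where the
--     pattern matches in a single pass, then picks the match preferred by
--     the hint/outward/whole-file priority.
--     """
--     if not pattern:
--         return None
--
--     norm = [l.rstrip() for l in lines]
--     pat = [p.rstrip() for p in pattern]
--     m = len(pat)
--     matches = [i for i in range(len(lines) - m + 1) if norm[i:i + m] == pat]
--
--     # Nearest match within the 50-line window around the hint wins;
--     # on equal distance the one before the hint wins (key 2|d| for d<=0, 2|d|+1 for d>0).
--     best = None
--     for o in matches:
--         d = o - hint_offset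
--         if -50 < d < 50:
--             key = 2 * abs(d) + (1 if d > 0 else 0)
--             if best is None or key < best[0]:
--                 best = (key, o)
--     if best is not None:
--         return best[1]
--
--     # Otherwise the first match in the whole file, if any.
--     return matches[0] if matches else None
-- ===== Notes on version B (the rewrite author's own statement) =====
-- stated objective: alternative
-- what changed: B rstrip-normalizes all lines and the pattern once, collects every matching offset in a single pass, and then selects the winner by a key (2*|delta| + tie bit) that encodes A's hint/outward/whole-file priority, instead of A's repeated window probing that re-rstrips the lines at every probed offset.
import Mathlib
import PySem

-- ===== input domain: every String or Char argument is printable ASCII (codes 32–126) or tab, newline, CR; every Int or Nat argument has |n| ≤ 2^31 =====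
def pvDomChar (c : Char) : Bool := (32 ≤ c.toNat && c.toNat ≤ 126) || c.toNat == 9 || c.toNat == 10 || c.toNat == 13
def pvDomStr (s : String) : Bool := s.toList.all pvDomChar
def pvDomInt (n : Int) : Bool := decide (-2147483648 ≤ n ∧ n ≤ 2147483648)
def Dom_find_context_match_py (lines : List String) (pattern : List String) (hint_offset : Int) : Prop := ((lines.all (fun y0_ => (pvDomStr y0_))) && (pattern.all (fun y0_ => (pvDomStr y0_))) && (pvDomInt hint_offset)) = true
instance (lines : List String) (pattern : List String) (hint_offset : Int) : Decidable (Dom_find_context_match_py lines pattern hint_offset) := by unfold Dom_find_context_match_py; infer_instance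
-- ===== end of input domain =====

-- B collects all pattern matches in one pass over rstrip-normalized lines and then
-- selects by the hint/outward/whole-file priority, instead of A's repeated window probing
-- that re-rstrips lines at every probe (objective: alternative; equal return values proved).

-- ===== PORT A =====
-- _lines_match: compare lines ignoring trailing whitespace
def pvLinesMatch (a b : String) : Bool := PySem.Str.rstrip a == PySem.Str.rstrip b

-- _check_at: bounds guard, then all(_lines_match(lines[offset+i], pattern[i]) for i in range(len(pattern)))
-- (indices are in range after the guard, so pyGetD with default "" is exact here)
def pvCheckAt (lines : List String) (pattern : List String) (offset : Int) : Bool :=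
  if offset < 0 || offset + (pattern.length : Int) > (lines.length : Int) then false
  else (List.range pattern.length).all (fun i =>
    pvLinesMatch (PySem.List.pyGetD lines (offset + (i : Int)) "")
                 (PySem.List.pyGetD pattern (i : Int) ""))

-- for delta in range(1, 50): check hint-delta, then hint+delta, early return
def pvOutward (lines : List String) (pattern : List String) (hint : Int) : List Int → Option Int
  | [] => none
  | d :: rest =>
    if pvCheckAt lines pattern (hint - d) then some (hint - d)
    else if pvCheckAt lines pattern (hint + d) then some (hint + d)
    else pvOutward lines pattern hint rest

-- for i in range(len(lines)): first i with _check_at(i)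
def pvScan (lines : List String) (pattern : List String) : List Int → Option Int
  | [] => none
  | i :: rest => if pvCheckAt lines pattern i then some i else pvScan lines pattern rest

def find_context_match_py (lines : List String) (pattern : List String) (hint_offset : Int) : Option Int :=
  if pattern = [] then none
  else if pvCheckAt lines pattern hint_offset then some hint_offset
  else match pvOutward lines pattern hint_offset (PySem.List.pyRange 1 50 1) with
    | some r => some r
    | none => pvScan lines pattern (PySem.List.pyRange 0 (lines.length : Int) 1)

-- ===== PORT B =====
-- matches = [i for i in range(len(lines) - m + 1) if norm[i:i+m] == pat]
def pvMatchesB (lines : List String) (pattern : List String) : List Int :=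
  let norm := lines.map PySem.Str.rstrip
  let pat := pattern.map PySem.Str.rstrip
  (PySem.List.pyRange 0 ((lines.length : Int) - (pattern.length : Int) + 1) 1).filter
    (fun i => PySem.List.slice norm (some i) (some (i + (pattern.length : Int))) == pat)

-- body of B's selection loop: keep the (key, offset) with the smallest key inside the window
def pvBestStep (hint : Int) (best : Option (Int × Int)) (o : Int) : Option (Int × Int) :=
  let d := o - hint
  if -50 < d ∧ d < 50 then
    let key := 2 * |d| + (if 0 < d then 1 else 0)
    match best with
    | none => some (key, o)
    | some b => if key < b.1 then some (key, o) else some b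
  else best

def find_context_match_py_alt (lines : List String) (pattern : List String) (hint_offset : Int) : Option Int :=
  if pattern = [] then none
  else
    match (pvMatchesB lines pattern).foldl (pvBestStep hint_offset) none with
    | some b => some b.2
    | none => match pvMatchesB lines pattern with
      | [] => none
      | x :: _ => some x

-- ===== PRECONDITION & SPEC =====
def Spec_find_context_match_py (lines : List String) (pattern : List String) (hint_offset : Int) (out : Option Int) : Prop := out = find_context_match_py_alt lines pattern hint_offset
instance (lines : List String) (pattern : List String) (hint_offset : Int) (out : Option Int) : Decidable (Spec_find_context_match_py lines pattern hint_offset out) := by unfold Spec_find_context_match_py; infer_instance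

-- ===== CLAIM (what is proved, stated in full; the proofs are below) =====
def Claim_equal_find_context_match_py : Prop := ∀ (lines : List String) (pattern : List String) (hint_offset : Int), Dom_find_context_match_py lines pattern hint_offset → Spec_find_context_match_py lines pattern hint_offset (find_context_match_py lines pattern hint_offset)

-- ===== LEMMAS AND PROOFS =====

-- proof-side notions
def pvGood (hint o : Int) : Prop := -50 < o - hint ∧ o - hint < 50

def pvKey (hint o : Int) : Int := 2 * |o - hint| + (if 0 < o - hint then 1 else 0)

def pvCandDeltas : List Int := 0 :: (PySem.List.pyRange 1 50 1).flatMap (fun d => [-d, d])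

def pvCandList (hint : Int) : List Int := pvCandDeltas.map (fun d => hint + d)

lemma pvKey_add (hint d : Int) : pvKey hint (hint + d) = 2 * |d| + (if 0 < d then 1 else 0) := by
  simp [pvKey]

lemma pvKey_inj {hint a b : Int} (h : pvKey hint a = pvKey hint b) : a = b := by
  unfold pvKey at h
  rcases abs_cases (a - hint) with ⟨ha, _⟩ | ⟨ha, _⟩ <;>
    rcases abs_cases (b - hint) with ⟨hb, _⟩ | ⟨hb, _⟩ <;>
      rw [ha, hb] at h <;> split_ifs at h <;> omega

lemma pvCand_pairwise (hint : Int) :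
    (pvCandList hint).Pairwise (fun x y => pvKey hint x < pvKey hint y) := by
  unfold pvCandList
  rw [List.pairwise_map]
  simp only [pvKey_add]
  decide

lemma pvGood_mem_cand {hint o : Int} (h : pvGood hint o) : o ∈ pvCandList hint := by
  have : o = hint + (o - hint) := by ring
  rw [this]
  apply List.mem_map_of_mem
  unfold pvCandDeltas
  rcases h with ⟨h1, h2⟩
  by_cases h0 : o - hint = 0
  · simp [h0]
  · refine List.mem_cons_of_mem _ ?_
    rw [List.mem_flatMap]
    refine ⟨|o - hint|, ?_, ?_⟩
    · rw [PySem.List.mem_pyRange_one]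
      constructor
      · rcases abs_cases (o - hint) with ⟨ha, _⟩ | ⟨ha, _⟩ <;> omega
      · rcases abs_cases (o - hint) with ⟨ha, _⟩ | ⟨ha, _⟩ <;> omega
    · rcases abs_cases (o - hint) with ⟨ha, _⟩ | ⟨ha, _⟩ <;> simp [ha]

lemma pvCand_good {hint o : Int} (h : o ∈ pvCandList hint) : pvGood hint o := by
  unfold pvCandList at h
  rw [List.mem_map] at h
  obtain ⟨d, hd, rfl⟩ := h
  have hr : ∀ d ∈ pvCandDeltas, -50 < d ∧ d < 50 := by decide
  have := hr d hd
  constructor <;> omega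

-- find? on a key-increasing list returns the key-minimal hit
lemma pvFind_min {p : Int → Bool} {key : Int → Int} :
    ∀ (l : List Int), l.Pairwise (fun x y => key x < key y) →
    ∀ x, l.find? p = some x → ∀ y ∈ l, p y = true → key x ≤ key y := by
  intro l
  induction l with
  | nil => intro _ x hx; simp [List.find?] at hx
  | cons a l ih =>
    intro hp x hx y hy hpy
    rcases List.pairwise_cons.mp hp with ⟨hrel, htail⟩
    cases hpa : p a with
    | true =>
      simp only [List.find?_cons, hpa] at hx
      injection hx with hx
      subst hx
      rcases List.mem_cons.mp hy with rfl | hy'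
      · exact le_rfl
      · exact le_of_lt (hrel y hy')
    | false =>
      simp only [List.find?_cons, hpa] at hx
      rcases List.mem_cons.mp hy with rfl | hy'
      · rw [hpa] at hpy; exact absurd hpy (by simp)
      · exact ih htail x hx y hy' hpy

-- step lemmas for B's selection fold
lemma pvStep_bad (hint : Int) (best : Option (Int × Int)) (o : Int) (h : ¬ pvGood hint o) :
    pvBestStep hint best o = best := by
  simp only [pvBestStep]
  rw [if_neg]
  intro hc; exact h ⟨hc.1, hc.2⟩

lemma pvStep_none (hint o : Int) (h : pvGood hint o) :
    pvBestStep hint none o = some (pvKey hint o, o) := by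
  obtain ⟨h1, h2⟩ := h
  simp only [pvBestStep]
  rw [if_pos ⟨h1, h2⟩]
  rfl

lemma pvStep_some (hint x o : Int) (h : pvGood hint o) :
    pvBestStep hint (some (pvKey hint x, x)) o =
      if pvKey hint o < pvKey hint x then some (pvKey hint o, o) else some (pvKey hint x, x) := by
  obtain ⟨h1, h2⟩ := h
  simp only [pvBestStep]
  rw [if_pos ⟨h1, h2⟩]
  rfl

-- fold characterization: starting from a good seed
lemma pvFold_some (hint : Int) :
    ∀ (l : List Int) (x : Int), pvGood hint x →
    ∃ y, (y = x ∨ y ∈ l) ∧ pvGood hint y ∧ pvKey hint y ≤ pvKey hint x ∧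
      (∀ o ∈ l, pvGood hint o → pvKey hint y ≤ pvKey hint o) ∧
      l.foldl (pvBestStep hint) (some (pvKey hint x, x)) = some (pvKey hint y, y) := by
  intro l
  induction l with
  | nil => intro x hx; exact ⟨x, Or.inl rfl, hx, le_rfl, by simp, rfl⟩
  | cons o l ih =>
    intro x hx
    by_cases hgo : pvGood hint o
    · by_cases hk : pvKey hint o < pvKey hint x
      · obtain ⟨y, hy1, hy2, hy3, hy4, hy5⟩ := ih o hgo
        refine ⟨y, ?_, hy2, le_of_lt (lt_of_le_of_lt hy3 hk), ?_, ?_⟩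
        · rcases hy1 with rfl | h; exact Or.inr (List.mem_cons_self ..); exact Or.inr (List.mem_cons_of_mem _ h)
        · intro o' ho' hgo'
          rcases List.mem_cons.mp ho' with rfl | ho''
          · exact hy3
          · exact hy4 o' ho'' hgo'
        · simp only [List.foldl_cons]
          rw [pvStep_some hint x o hgo, if_pos hk]
          exact hy5
      · obtain ⟨y, hy1, hy2, hy3, hy4, hy5⟩ := ih x hx
        refine ⟨y, ?_, hy2, hy3, ?_, ?_⟩
        · rcases hy1 with rfl | h; exact Or.inl rfl; exact Or.inr (List.mem_cons_of_mem _ h)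
        · intro o' ho' hgo'
          rcases List.mem_cons.mp ho' with rfl | ho''
          · omega
          · exact hy4 o' ho'' hgo'
        · simp only [List.foldl_cons]
          rw [pvStep_some hint x o hgo, if_neg hk]
          exact hy5
    · obtain ⟨y, hy1, hy2, hy3, hy4, hy5⟩ := ih x hx
      refine ⟨y, ?_, hy2, hy3, ?_, ?_⟩
      · rcases hy1 with rfl | h; exact Or.inl rfl; exact Or.inr (List.mem_cons_of_mem _ h)
      · intro o' ho' hgo'
        rcases List.mem_cons.mp ho' with rfl | ho''
        · exact absurd hgo' hgo
        · exact hy4 o' ho'' hgo'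
      · simp only [List.foldl_cons]
        rw [pvStep_bad hint _ o hgo]
        exact hy5

lemma pvFold_char (hint : Int) :
    ∀ (l : List Int),
      (l.foldl (pvBestStep hint) none = none ∧ ∀ o ∈ l, ¬ pvGood hint o) ∨
      (∃ y, y ∈ l ∧ pvGood hint y ∧ (∀ o ∈ l, pvGood hint o → pvKey hint y ≤ pvKey hint o) ∧
        l.foldl (pvBestStep hint) none = some (pvKey hint y, y)) := by
  intro l
  induction l with
  | nil => exact Or.inl ⟨rfl, by simp⟩
  | cons o l ih =>
    by_cases hgo : pvGood hint o
    · right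
      have hstep : pvBestStep hint none o = some (pvKey hint o, o) := pvStep_none hint o hgo
      obtain ⟨y, hy1, hy2, hy3, hy4, hy5⟩ := pvFold_some hint l o hgo
      refine ⟨y, ?_, hy2, ?_, ?_⟩
      · rcases hy1 with rfl | h; exact List.mem_cons_self ..; exact List.mem_cons_of_mem _ h
      · intro o' ho' hgo'
        rcases List.mem_cons.mp ho' with rfl | ho''
        · exact hy3
        · exact hy4 o' ho'' hgo'
      · simp only [List.foldl_cons, hstep]; exact hy5
    · have hstep : pvBestStep hint none o = none := pvStep_bad hint none o hgo
      rcases ih with ⟨h1, h2⟩ | ⟨y, hy1, hy2, hy3, hy4⟩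
      · left
        refine ⟨by simp only [List.foldl_cons, hstep]; exact h1, ?_⟩
        intro o' ho'
        rcases List.mem_cons.mp ho' with rfl | ho''
        · exact hgo
        · exact h2 o' ho''
      · right
        refine ⟨y, List.mem_cons_of_mem _ hy1, hy2, ?_, by simp only [List.foldl_cons, hstep]; exact hy4⟩
        intro o' ho' hgo'
        rcases List.mem_cons.mp ho' with rfl | ho''
        · exact absurd hgo' hgo
        · exact hy3 o' ho'' hgo'

-- pointwise bridge: the rstrip-normalized slice comparison equals A's all-range check
lemma pvGetD_nat (xs : List String) (k : Nat) (hk : k < xs.length) :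
    PySem.List.pyGetD xs (k : Int) "" = xs[k] := by
  rw [PySem.List.pyGetD_eq_getElem xs "" (by positivity) (by exact_mod_cast hk)]
  simp

lemma pvCore (lines pattern : List String) (a : Nat)
    (h1 : a + pattern.length ≤ lines.length) :
    (PySem.List.slice (lines.map PySem.Str.rstrip) (some (a : Int))
        (some ((a : Int) + (pattern.length : Int))) == pattern.map PySem.Str.rstrip) =
    (List.range pattern.length).all (fun i =>
      pvLinesMatch (PySem.List.pyGetD lines ((a : Int) + (i : Int)) "")
                   (PySem.List.pyGetD pattern ((i : Int)) "")) := by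
  rw [PySem.List.slice_natCast_add]
  rw [Bool.eq_iff_iff, beq_iff_eq, List.all_eq_true]
  have hstep : ∀ (i : Nat) (hi : i < pattern.length),
      ((pvLinesMatch (PySem.List.pyGetD lines ((a : Int) + (i : Int)) "")
          (PySem.List.pyGetD pattern ((i : Int)) "") = true) ↔
        (PySem.Str.rstrip (lines[a + i]'(by omega)) = PySem.Str.rstrip (pattern[i]'(by omega)))) := by
    intro i hi
    have hc : (a : Int) + (i : Int) = ((a + i : Nat) : Int) := by push_cast; ring
    rw [hc, pvGetD_nat lines (a + i) (by omega), pvGetD_nat pattern i (by omega)]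
    simp [pvLinesMatch]
  constructor
  · intro heq i hi
    rw [List.mem_range] at hi
    rw [hstep i hi]
    have hq := congrArg (fun l => l[i]?) heq
    simp only [List.getElem?_take, List.getElem?_drop, List.getElem?_map, hi, if_pos] at hq
    rw [List.getElem?_eq_getElem (by omega : a + i < lines.length),
        List.getElem?_eq_getElem (by omega : i < pattern.length)] at hq
    simp only [Option.map_some] at hq
    exact Option.some.inj hq
  · intro hall
    apply List.ext_getElem?
    intro i
    by_cases hi : i < pattern.length
    · have h := (hstep i hi).mp (hall i (List.mem_range.mpr hi))
      simp only [List.getElem?_take, List.getElem?_drop, List.getElem?_map, hi, if_pos]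
      rw [List.getElem?_eq_getElem (by omega : a + i < lines.length),
          List.getElem?_eq_getElem (by omega : i < pattern.length)]
      simp only [Option.map_some]
      exact congrArg some h
    · rw [List.getElem?_eq_none, List.getElem?_eq_none]
      · simpa using hi
      · simp only [List.length_take, List.length_drop, List.length_map]; omega

-- A's check when the bounds hold, and when they fail
lemma pvCheck_out {lines pattern : List String} {o : Int}
    (h : o < 0 ∨ o + (pattern.length : Int) > (lines.length : Int)) :
    pvCheckAt lines pattern o = false := by
  unfold pvCheckAt
  rw [if_pos (by rcases h with h | h <;> simp [h])]

lemma pvCheck_in {lines pattern : List String} {o : Int}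
    (h0 : 0 ≤ o) (h1 : o + (pattern.length : Int) ≤ (lines.length : Int)) :
    pvCheckAt lines pattern o =
      (PySem.List.slice (lines.map PySem.Str.rstrip) (some o)
        (some (o + (pattern.length : Int))) == pattern.map PySem.Str.rstrip) := by
  unfold pvCheckAt
  rw [if_neg (by simp; omega)]
  have ho : o = ((o.toNat : Nat) : Int) := (Int.toNat_of_nonneg h0).symm
  rw [ho]
  exact (pvCore lines pattern o.toNat (by omega)).symm

-- membership in B's match list ↔ A's check (for nonempty pattern)
lemma pvMem_matches {lines pattern : List String} (hp : pattern ≠ []) (o : Int) :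
    o ∈ pvMatchesB lines pattern ↔ pvCheckAt lines pattern o = true := by
  have hm1 : 1 ≤ pattern.length := List.length_pos_iff.mpr hp
  unfold pvMatchesB
  simp only [List.mem_filter, PySem.List.mem_pyRange_one]
  constructor
  · rintro ⟨⟨hb0, hb1⟩, hpred⟩
    rw [pvCheck_in hb0 (by omega)]
    exact hpred
  · intro hc
    by_cases hb : o < 0 ∨ o + (pattern.length : Int) > (lines.length : Int)
    · rw [pvCheck_out hb] at hc; exact absurd hc (by simp)
    · push_neg at hb
      obtain ⟨hb0, hb1⟩ := hb
      rw [pvCheck_in (by omega) hb1] at hc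
      exact ⟨⟨by omega, by omega⟩, hc⟩

-- stage 1+2 of A as a single find? over the candidate list
lemma pvOutward_eq (lines pattern : List String) (hint : Int) :
    ∀ ds, pvOutward lines pattern hint ds =
      ((ds.flatMap (fun d => [-d, d])).map (fun d => hint + d)).find? (pvCheckAt lines pattern) := by
  intro ds
  induction ds with
  | nil => rfl
  | cons d rest ih =>
    simp only [pvOutward, List.flatMap_cons, List.map_append, List.find?_append, List.map_cons,
      List.map_nil, List.find?_cons]
    have h1 : hint + -d = hint - d := by ring
    rw [h1]
    cases hc : pvCheckAt lines pattern (hint - d) with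
    | true => simp [hc]
    | false =>
      cases hc2 : pvCheckAt lines pattern (hint + d) with
      | true => simp [hc, hc2]
      | false => simp [hc, hc2, ih]

lemma pvStage12_eq (lines pattern : List String) (hint : Int) :
    (if pvCheckAt lines pattern hint then some hint
     else pvOutward lines pattern hint (PySem.List.pyRange 1 50 1)) =
    (pvCandList hint).find? (pvCheckAt lines pattern) := by
  rw [pvOutward_eq]
  unfold pvCandList pvCandDeltas
  simp only [List.map_cons, List.find?_cons, add_zero]
  cases hc : pvCheckAt lines pattern hint with
  | true => simp [hc]
  | false => simp [hc]

-- scan is find?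
lemma pvScan_eq (lines pattern : List String) :
    ∀ l, pvScan lines pattern l = l.find? (pvCheckAt lines pattern) := by
  intro l
  induction l with
  | nil => rfl
  | cons i rest ih =>
    simp only [pvScan, List.find?_cons]
    cases hc : pvCheckAt lines pattern i with
    | true => simp [hc]
    | false => simp [hc, ih]

-- find? with pointwise equal predicates
lemma pvFind_congr {p q : Int → Bool} :
    ∀ (l : List Int), (∀ x ∈ l, p x = q x) → l.find? p = l.find? q := by
  intro l
  induction l with
  | nil => intro _; rfl
  | cons a l ih =>
    intro h
    simp only [List.find?_cons, h a (List.mem_cons_self ..)]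
    cases q a
    · exact ih (fun x hx => h x (List.mem_cons_of_mem _ hx))
    · rfl

-- whole-file scan agrees with head of B's match list
lemma pvScan_head (lines pattern : List String) (hp : pattern ≠ []) :
    (PySem.List.pyRange 0 (lines.length : Int) 1).find? (pvCheckAt lines pattern) =
      (pvMatchesB lines pattern).head? := by
  have hm1 : 1 ≤ pattern.length := List.length_pos_iff.mpr hp
  by_cases hn : (lines.length : Int) - (pattern.length : Int) + 1 ≤ 0
  · -- pattern longer than file: no offset can check, and B's range is empty
    have h1 : pvMatchesB lines pattern = [] := by
      unfold pvMatchesB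
      rw [PySem.List.pyRange_one_eq_nil hn]
      rfl
    rw [h1, List.find?_eq_none.mpr]
    · rfl
    · intro x hx
      rw [PySem.List.mem_pyRange_one] at hx
      rw [pvCheck_out (Or.inr (by omega))]
      simp
  · push_neg at hn
    rw [PySem.List.pyRange_one_append 0 ((lines.length : Int) - (pattern.length : Int) + 1)
          (lines.length : Int) (by omega) (by omega),
        List.find?_append]
    have h2 : (PySem.List.pyRange ((lines.length : Int) - (pattern.length : Int) + 1)
        (lines.length : Int) 1).find? (pvCheckAt lines pattern) = none := by
      rw [List.find?_eq_none]
      intro x hx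
      rw [PySem.List.mem_pyRange_one] at hx
      rw [pvCheck_out (Or.inr (by omega))]
      simp
    rw [h2, Option.or_none]
    unfold pvMatchesB
    rw [List.head?_filter]
    apply pvFind_congr
    intro x hx
    rw [PySem.List.mem_pyRange_one] at hx
    exact pvCheck_in (by omega) (by omega)

-- A / B bodies in canonical form (for nonempty pattern)
lemma pvA_eq (lines pattern : List String) (hint : Int) (hp : pattern ≠ []) :
    find_context_match_py lines pattern hint =
      match (pvCandList hint).find? (pvCheckAt lines pattern) with
      | some r => some r
      | none => pvScan lines pattern (PySem.List.pyRange 0 (lines.length : Int) 1) := by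
  unfold find_context_match_py
  rw [if_neg hp, ← pvStage12_eq]
  cases hc : pvCheckAt lines pattern hint with
  | true => simp [hc]
  | false => simp [hc]

lemma pvAlt_eq (lines pattern : List String) (hint : Int) (hp : pattern ≠ []) :
    find_context_match_py_alt lines pattern hint =
      match (pvMatchesB lines pattern).foldl (pvBestStep hint) none with
      | some b => some b.2
      | none => (pvMatchesB lines pattern).head? := by
  unfold find_context_match_py_alt
  rw [if_neg hp]
  rcases (pvMatchesB lines pattern).foldl (pvBestStep hint) none with _ | b
  · cases pvMatchesB lines pattern <;> rfl
  · rfl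


-- ===== VERDICT (by name: the statement is the Claim_ definition above) =====
theorem find_context_match_py_spec : Claim_equal_find_context_match_py := by
  intro lines pattern hint _hdom
  unfold Spec_find_context_match_py
  by_cases hp : pattern = []
  · simp [find_context_match_py, find_context_match_py_alt, hp]
  · rw [pvA_eq lines pattern hint hp, pvAlt_eq lines pattern hint hp]
    rcases hfold : (pvMatchesB lines pattern).foldl (pvBestStep hint) none with _ | b
    · -- no in-window match: A's stage 1+2 find nothing and both fall back to the scan
      rcases pvFold_char hint (pvMatchesB lines pattern) with ⟨_, hnone⟩ | ⟨y, _, hy2, _, hy4⟩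
      · have hcand : (pvCandList hint).find? (pvCheckAt lines pattern) = none := by
          rw [List.find?_eq_none]
          intro x hx hcx
          exact hnone x ((pvMem_matches hp x).mpr hcx) (pvCand_good hx)
        rw [hcand]
        exact (pvScan_eq lines pattern _).trans (pvScan_head lines pattern hp)
      · rw [hfold] at hy4; exact absurd hy4 (by simp)
    · -- B found the key-minimal in-window match; A's stage 1+2 find the same offset
      rcases pvFold_char hint (pvMatchesB lines pattern) with ⟨h1, _⟩ | ⟨y, hy1, hy2, hy3, hy4⟩
      · rw [hfold] at h1; exact absurd h1 (by simp)
      · rw [hfold] at hy4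
        injection hy4 with hy4
        subst hy4
        have hcy : pvCheckAt lines pattern y = true := (pvMem_matches hp y).mp hy1
        have hymem : y ∈ pvCandList hint := pvGood_mem_cand hy2
        rcases hfind : (pvCandList hint).find? (pvCheckAt lines pattern) with _ | x
        · rw [List.find?_eq_none] at hfind
          exact absurd hcy (hfind y hymem)
        · have hcx : pvCheckAt lines pattern x = true := List.find?_some hfind
          have hgx : pvGood hint x := pvCand_good (List.mem_of_find?_eq_some hfind)
          have hle1 : pvKey hint x ≤ pvKey hint y :=
            pvFind_min (pvCandList hint) (pvCand_pairwise hint) x hfind y hymem hcy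
          have hle2 : pvKey hint y ≤ pvKey hint x :=
            hy3 x ((pvMem_matches hp x).mpr hcx) hgx
          have hxy : x = y := pvKey_inj (le_antisymm hle1 hle2)
          subst hxy
          rfl
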